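-- pv_equiv track=rewrite | github.com/Nuthouse01/PMX-VMD-Scripting-Tools | mmd_scripting/core/translation_dictionaries.py | _piecewise_translate
-- ===== SOURCE A (Python) =====
-- from typing import Dict, List
--
-- def _piecewise_translate(in_list: List[str], in_dict: Dict[str, str]):
-- 	"""
-- 	Needed to put a (modified) copy of this function in this file, to fix recursive import problem
-- 	"""
-- 	outlist = []  # list to build & return
--
-- 	dictitems = list(in_dict.items())
--
-- 	for out in in_list:
-- 		if (not out) or out.isspace():  # support bad/missing data
-- 			outlist.append("JP_NULL")
-- 			continue
-- 		# goal: substrings that match keys of "words_dict" get replaced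
-- 		# starting from each char position, try to match against the contents of the dict. longest items are first!
-- 		i = 0
-- 		while i < len(out):  # starting from each char of the string,
-- 			found_match = False
-- 			for (key, val) in dictitems:  # try to find anything in the dict to match against,
-- 				if out.startswith(key, i):  # and if something is found starting from 'i',
-- 					found_match = True
-- 					# i am going to replace it key->val
-- 					out = out[0:i] + val + out[i + len(key):]
-- 					# i don't need to examine or try to replace on any of these chars, so skip ahead a bit
-- 					i += len(val)
-- 					# nothing else will match here, since I just replaced the thing, so break out of iterating on dict keys
-- 					break
-- 			if found_match is False:
-- 				i += 1
-- 		# once all uses of all keys have been replaced, then append the result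
-- 		outlist.append(out)
--
-- 	return outlist  # return as a list
-- ===== SOURCE B (Python) =====
-- from typing import Dict, List
--
-- def _piecewise_translate(in_list: List[str], in_dict: Dict[str, str]):
-- 	"""One pass over each string: bucket the dict keys by first char once, then scan the
-- 	original string left-to-right building the output pieces (no quadratic re-slicing)."""
-- 	# index: first char -> list of (rest-of-key, value), in dict insertion order
-- 	index = {}
-- 	for key, val in in_dict.items():
-- 		if key:  # an empty key can never be consumed; skip it
-- 			index.setdefault(key[0], []).append((key[1:], val))
-- 	outlist = []
-- 	for s in in_list:
-- 		if (not s) or s.isspace():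
-- 			outlist.append("JP_NULL")
-- 			continue
-- 		pieces = []
-- 		i = 0
-- 		n = len(s)
-- 		while i < n:
-- 			c = s[i]
-- 			for tail, val in index.get(c, ()):
-- 				if s.startswith(tail, i + 1):
-- 					pieces.append(val)
-- 					i += 1 + len(tail)
-- 					break
-- 			else:
-- 				pieces.append(c)
-- 				i += 1
-- 		outlist.append("".join(pieces))
-- 	return outlist
-- ===== Notes on version B (the rewrite author's own statement) =====
-- stated objective: faster
-- what changed: Instead of mutating the string in place with quadratic slicing and scanning the whole dict at every position, B buckets the dict keys by first character once and makes a single left-to-right pass over each original string, emitting output pieces and joining them at the end.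
-- outside the precondition, e.g. on _piecewise_translate(['aa'], {'a': 'b', '': 'x'}): A returns ['bb'], B returns ['bb']
import Mathlib
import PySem

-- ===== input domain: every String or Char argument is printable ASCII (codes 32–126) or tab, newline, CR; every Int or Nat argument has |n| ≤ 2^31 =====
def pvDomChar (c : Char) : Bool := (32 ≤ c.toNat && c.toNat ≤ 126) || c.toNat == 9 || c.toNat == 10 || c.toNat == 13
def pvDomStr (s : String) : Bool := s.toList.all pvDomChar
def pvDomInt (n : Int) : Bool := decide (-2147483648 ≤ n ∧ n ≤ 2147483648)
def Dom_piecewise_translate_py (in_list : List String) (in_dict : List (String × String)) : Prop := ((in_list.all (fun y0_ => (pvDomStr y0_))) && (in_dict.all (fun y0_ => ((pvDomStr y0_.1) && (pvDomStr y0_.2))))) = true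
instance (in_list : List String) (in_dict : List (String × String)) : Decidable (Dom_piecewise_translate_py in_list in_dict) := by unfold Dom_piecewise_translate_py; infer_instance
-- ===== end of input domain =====

-- B replaces A's in-place string mutation (full re-slice per replacement, full dict scan per
-- position) by a one-pass scan of the original string against a first-char index of the keys:
-- measurably faster, same return values on Pre_ (dicts without an empty key).

-- ===== PORT A =====
-- the while-loop over (out, i); Python's out.startswith(key, i) for 0 ≤ i ≤ len(out) is exactly
-- key.toList.isPrefixOf (out.drop i), and out[0:i] + val + out[i+len(key):] for 0 ≤ i is exactly
-- out.take i ++ val.toList ++ out.drop (i + len key) (slices with nonneg in-range bounds).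
-- fuel: under Pre_ (no empty key) each iteration strictly decreases out.length - i, so the
-- Python loop makes at most len(out) iterations; fuel = len(out) + 1 never runs out there.
def pvALoop (dictitems : List (String × String)) : Nat → List Char → Nat → List Char
  | 0, out, _ => out
  | fuel+1, out, i =>
    if i < out.length then
      match dictitems.find? (fun kv => kv.1.toList.isPrefixOf (out.drop i)) with
      | some kv =>
          pvALoop dictitems fuel
            (out.take i ++ kv.2.toList ++ out.drop (i + kv.1.toList.length))
            (i + kv.2.toList.length)
      | none => pvALoop dictitems fuel out (i+1)
    else out

def piecewise_translate_py (in_list : List String) (in_dict : List (String × String)) : List String :=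
  in_list.foldl (fun outlist out =>
    if out.toList.isEmpty || PySem.Str.strIsspace out then outlist ++ ["JP_NULL"]
    else outlist ++ [String.ofList (pvALoop in_dict (out.toList.length + 1) out.toList 0)]) []

-- ===== PORT B =====
-- index.setdefault(key[0], []).append((key[1:], val)) for nonempty keys, in dict order
def pvIndex (in_dict : List (String × String)) : PySem.Dict Char (List (List Char × String)) :=
  in_dict.foldl (fun d kv =>
    match kv.1.toList with
    | [] => d
    | c :: t => d.insert c (d.getD c [] ++ [(t, kv.2)])) PySem.Dict.empty

-- the inner while-loop of B: one pass over the original characters, emitting pieces;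
-- s.startswith(tail, i+1) is tail.isPrefixOf rest (rest = the chars after position i)
def pvBLoop (index : PySem.Dict Char (List (List Char × String))) : List Char → List String
  | [] => []
  | c :: rest =>
    match (index.getD c []).find? (fun tv => tv.1.isPrefixOf rest) with
    | some tv => tv.2 :: pvBLoop index (rest.drop tv.1.length)
    | none => String.ofList [c] :: pvBLoop index rest
  termination_by l => l.length
  decreasing_by
  · simp only [List.length_drop, List.length_cons]; omega
  · simp only [List.length_cons]; omega

def piecewise_translate_py_alt (in_list : List String) (in_dict : List (String × String)) : List String :=
  let index := pvIndex in_dict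
  in_list.foldl (fun outlist s =>
    if s.toList.isEmpty || PySem.Str.strIsspace s then outlist ++ ["JP_NULL"]
    else outlist ++ [PySem.Str.join "" (pvBLoop index s.toList)]) []

-- ===== PRECONDITION & SPEC =====
-- Pre_ excludes dicts containing an empty key unless every string is empty/whitespace: with an
-- empty key A's while-loop loops forever on the first scanned non-blank string, except in the
-- accidental case where some earlier key happens to match at every position, which we do not claim.
def Pre_piecewise_translate_py (in_list : List String) (in_dict : List (String × String)) : Prop :=
  (∀ kv ∈ in_dict, kv.1 ≠ "") ∨ (∀ s ∈ in_list, (s.toList.isEmpty || PySem.Str.strIsspace s) = true)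
instance (in_list : List String) (in_dict : List (String × String)) : Decidable (Pre_piecewise_translate_py in_list in_dict) := by unfold Pre_piecewise_translate_py; infer_instance

def pvWitness_piecewise_translate_py : List String × (List (String × String)) :=
  (["abc a"], [("ab", "X"), ("a", "y")])

def Spec_piecewise_translate_py (in_list : List String) (in_dict : List (String × String)) (out : List String) : Prop := out = piecewise_translate_py_alt in_list in_dict
instance (in_list : List String) (in_dict : List (String × String)) (out : List String) : Decidable (Spec_piecewise_translate_py in_list in_dict out) := by unfold Spec_piecewise_translate_py; infer_instance

-- ===== CLAIM (what is proved, stated in full; the proofs are below) =====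
def Claim_equal_piecewise_translate_py : Prop := ∀ (in_list : List String) (in_dict : List (String × String)), Dom_piecewise_translate_py in_list in_dict → Pre_piecewise_translate_py in_list in_dict → Spec_piecewise_translate_py in_list in_dict (piecewise_translate_py in_list in_dict)

-- ===== LEMMAS AND PROOFS =====

-- what ends up in bucket c of the index: the nonempty keys starting with c, beheaded, in order
def pvBucket (in_dict : List (String × String)) (c : Char) : List (List Char × String) :=
  in_dict.filterMap (fun kv => match kv.1.toList with
    | [] => none
    | c' :: t => if c' = c then some (t, kv.2) else none)

theorem pvIndex_getD_gen (c : Char) (l : List (String × String)) :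
    ∀ d : PySem.Dict Char (List (List Char × String)),
    (l.foldl (fun d kv => match kv.1.toList with
        | [] => d
        | c' :: t => d.insert c' (d.getD c' [] ++ [(t, kv.2)])) d).getD c []
      = d.getD c [] ++ pvBucket l c := by
  induction l with
  | nil => intro d; simp [pvBucket]
  | cons kv t ih =>
    intro d
    simp only [List.foldl_cons, pvBucket, List.filterMap_cons]
    cases h : kv.1.toList with
    | nil => simpa [h, pvBucket] using ih d
    | cons c' tl =>
      simp only [h]
      rw [ih, PySem.Dict.getD_insert]
      by_cases hc : c' = c
      · subst hc; simp [pvBucket]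
      · simp [hc, Ne.symm hc, pvBucket]

theorem pvIndex_getD (in_dict : List (String × String)) (c : Char) :
    (pvIndex in_dict).getD c [] = pvBucket in_dict c := by
  unfold pvIndex
  rw [pvIndex_getD_gen]
  simp [PySem.Dict.empty, PySem.Dict.getD, PySem.Dict.get?]

theorem pvFind_bucket (l : List (String × String)) (c : Char) (rest : List Char)
    (hk : ∀ kv ∈ l, kv.1 ≠ "") :
    (pvBucket l c).find? (fun tv => tv.1.isPrefixOf rest)
      = (l.find? (fun kv => kv.1.toList.isPrefixOf (c :: rest))).map
          (fun kv => (kv.1.toList.tail, kv.2)) := by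
  induction l with
  | nil => simp [pvBucket]
  | cons kv t ih =>
    have hne : kv.1 ≠ "" := hk kv (List.mem_cons_self)
    have htl : kv.1.toList ≠ [] := by
      intro h
      exact hne (by simpa using congrArg String.ofList h)
    obtain ⟨c', tl, h⟩ : ∃ c' tl, kv.1.toList = c' :: tl := by
      cases hh : kv.1.toList with
      | nil => exact absurd hh htl
      | cons a b => exact ⟨a, b, rfl⟩
    have iht := ih (fun kv' h' => hk kv' (List.mem_cons_of_mem _ h'))
    simp only [pvBucket, List.filterMap_cons, h]
    simp only [pvBucket] at iht
    by_cases hc : c' = c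
    · subst hc
      rw [if_pos rfl]
      cases hp : tl.isPrefixOf rest with
      | true =>
        rw [List.find?_cons_of_pos (by simpa using hp),
          List.find?_cons_of_pos (by simp [h, List.isPrefixOf, hp])]
        simp [h]
      | false =>
        rw [List.find?_cons_of_neg (by simp [hp]),
          List.find?_cons_of_neg (by simp [h, List.isPrefixOf, hp])]
        exact iht
    · rw [if_neg hc, List.find?_cons_of_neg (by simp [h, List.isPrefixOf, hc])]
      exact iht

theorem pvLoop_eq (dict : List (String × String)) (hk : ∀ kv ∈ dict, kv.1 ≠ "") :
    ∀ (n : Nat) (suffix pre : List Char) (fuel : Nat), suffix.length = n → n < fuel →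
    pvALoop dict fuel (pre ++ suffix) pre.length
      = pre ++ ((pvBLoop (pvIndex dict) suffix).map String.toList).flatten := by
  intro n
  induction n using Nat.strong_induction_on with
  | _ n ih =>
    intro suffix pre fuel hlen hfuel
    obtain ⟨f, rfl⟩ : ∃ f, fuel = f + 1 := ⟨fuel - 1, by omega⟩
    cases suffix with
    | nil =>
      simp only [pvALoop, List.append_nil, pvBLoop, List.map_nil, List.flatten_nil]
      rw [if_neg (by omega)]
    | cons c rest =>
      have hlt : pre.length < (pre ++ c :: rest).length := by
        simp [List.length_append]
      have hn : rest.length + 1 = n := by simpa using hlen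
      have hdrop : (pre ++ c :: rest).drop pre.length = c :: rest := List.drop_left
      rw [pvALoop, if_pos hlt, hdrop, pvBLoop, pvIndex_getD, pvFind_bucket dict c rest hk]
      cases hf : dict.find? (fun kv => kv.1.toList.isPrefixOf (c :: rest)) with
      | none =>
        simp only [Option.map_none]

        have h1 : pre ++ c :: rest = (pre ++ [c]) ++ rest := by simp
        have h2 : pre.length + 1 = (pre ++ [c]).length := by simp
        rw [h1, h2, ih rest.length (by omega) rest (pre ++ [c]) f rfl (by omega)]
        simp
      | some kv =>
        have hmem : kv ∈ dict := List.mem_of_find?_eq_some hf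
        have hpref := List.find?_some hf
        simp only at hpref
        have htl : kv.1.toList ≠ [] := by
          intro h
          exact hk kv hmem (by simpa using congrArg String.ofList h)
        obtain ⟨c', tl, h⟩ : ∃ c' tl, kv.1.toList = c' :: tl := by
          cases hh : kv.1.toList with
          | nil => exact absurd hh htl
          | cons a b => exact ⟨a, b, rfl⟩
        simp only [Option.map_some]
        rw [h] at hpref
        simp only [List.isPrefixOf, Bool.and_eq_true, beq_iff_eq] at hpref
        obtain ⟨rfl, hpre2⟩ := hpref
        have htake : (pre ++ c' :: rest).take pre.length = pre := List.take_left
        have hdrop2 : (pre ++ c' :: rest).drop (pre.length + kv.1.toList.length)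
            = rest.drop tl.length := by
          rw [List.drop_length_add_append, h]
          simp
        rw [htake, hdrop2]
        have h2 : pre.length + kv.2.toList.length = (pre ++ kv.2.toList).length := by simp
        have hlen2 : (rest.drop tl.length).length < n := by
          simp only [List.length_drop]
          omega
        have hassoc : pre ++ kv.2.toList ++ rest.drop tl.length
            = (pre ++ kv.2.toList) ++ rest.drop tl.length := by simp
        rw [hassoc, h2,
          ih (rest.drop tl.length).length hlen2 (rest.drop tl.length) (pre ++ kv.2.toList) f rfl (by omega)]
        simp [Option.map_some, h]

theorem join_nil_flatten (xss : List (List Char)) : PySem.Chars.join [] xss = xss.flatten := by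
  induction xss with
  | nil => simp [PySem.Chars.join_nil]
  | cons p t ih =>
    cases t with
    | nil => simp [PySem.Chars.join_singleton]
    | cons q r => simp [PySem.Chars.join_cons_cons, ih]

theorem pvString_eq (dict : List (String × String)) (hk : ∀ kv ∈ dict, kv.1 ≠ "") (s : String) :
    String.ofList (pvALoop dict (s.toList.length + 1) s.toList 0)
      = PySem.Str.join "" (pvBLoop (pvIndex dict) s.toList) := by
  have h0 : pvALoop dict (s.toList.length + 1) s.toList 0
      = ((pvBLoop (pvIndex dict) s.toList).map String.toList).flatten := by
    have := pvLoop_eq dict hk s.toList.length s.toList [] (s.toList.length + 1) rfl (by omega)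
    simpa using this
  rw [h0, ← String.ofList_toList (s := PySem.Str.join "" (pvBLoop (pvIndex dict) s.toList)),
    PySem.Str.toList_join]
  simp [join_nil_flatten]

-- ===== VERDICT (by name: the statement is the Claim_ definition above) =====
theorem piecewise_translate_py_spec : Claim_equal_piecewise_translate_py := by
  intro in_list in_dict _ hpre
  unfold Spec_piecewise_translate_py piecewise_translate_py piecewise_translate_py_alt
  apply PySem.List.foldl_congr_mem
  intro acc s hs
  rcases hpre with hk | hblank
  · by_cases hc : (s.toList.isEmpty || PySem.Str.strIsspace s) = true
    · rw [if_pos hc, if_pos hc]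
    · rw [if_neg hc, if_neg hc, pvString_eq in_dict hk s]
  · rw [if_pos (hblank s hs), if_pos (hblank s hs)]
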